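-- pv_equiv track=rewrite | github.com/TakaIshikawa/blueprint | src/blueprint/task_search_relevance_readiness.py | _required_safeguards
-- ===== SOURCE A (Python) =====
-- from typing import Any, Iterable, Literal, Mapping, TypeVar
--
-- SearchRelevanceSignal = Literal[
--     "ranking",
--     "relevance",
--     "stemming",
--     "synonyms",
--     "typo_tolerance",
--     "facets",
--     "filters",
--     "embeddings",
--     "indexing_weights",
--     "personalization",
--     "query_analytics",
-- ]
--
-- SearchRelevanceSafeguard = Literal[
--     "golden_queries",
--     "offline_evaluation",
--     "relevance_metrics",
--     "rollback_plan",
--     "index_rebuild_validation",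
--     "analytics_instrumentation",
--     "manual_review",
-- ]
--
-- _SAFEGUARD_ORDER: tuple[SearchRelevanceSafeguard, ...] = (
--     "golden_queries",
--     "offline_evaluation",
--     "relevance_metrics",
--     "rollback_plan",
--     "index_rebuild_validation",
--     "analytics_instrumentation",
--     "manual_review",
-- )
--
-- def _required_safeguards(
--     signals: tuple[SearchRelevanceSignal, ...],
-- ) -> tuple[SearchRelevanceSafeguard, ...]:
--     required: set[SearchRelevanceSafeguard] = {
--         "golden_queries",
--         "offline_evaluation",
--         "relevance_metrics",
--         "rollback_plan",
--         "analytics_instrumentation",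
--     }
--     if {"stemming", "synonyms", "typo_tolerance", "embeddings", "indexing_weights"} & set(signals):
--         required.add("index_rebuild_validation")
--     if {"ranking", "relevance", "embeddings", "personalization", "indexing_weights"} & set(signals):
--         required.add("manual_review")
--     return tuple(safeguard for safeguard in _SAFEGUARD_ORDER if safeguard in required)
-- ===== SOURCE B (Python) =====
-- _SAFEGUARD_ORDER = (
--     "golden_queries",
--     "offline_evaluation",
--     "relevance_metrics",
--     "rollback_plan",
--     "index_rebuild_validation",
--     "analytics_instrumentation",
--     "manual_review",
-- )
--
-- _BASE = frozenset({
--     "golden_queries",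
--     "offline_evaluation",
--     "relevance_metrics",
--     "rollback_plan",
--     "analytics_instrumentation",
-- })
--
-- _IMPLIES = {
--     "embeddings": frozenset({"index_rebuild_validation", "manual_review"}),
--     "indexing_weights": frozenset({"index_rebuild_validation", "manual_review"}),
--     "stemming": frozenset({"index_rebuild_validation"}),
--     "synonyms": frozenset({"index_rebuild_validation"}),
--     "typo_tolerance": frozenset({"index_rebuild_validation"}),
--     "ranking": frozenset({"manual_review"}),
--     "relevance": frozenset({"manual_review"}),
--     "personalization": frozenset({"manual_review"}),
-- }
--
--
-- def _required_safeguards(signals):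
--     required = set(_BASE)
--     for sig in signals:
--         required |= _IMPLIES.get(sig, frozenset())
--     return tuple(s for s in _SAFEGUARD_ORDER if s in required)
-- ===== Notes on version B (the rewrite author's own statement) =====
-- stated objective: idiomatic
-- what changed: Replaces the two fixed trigger-set intersections with a single pass over the input signals, unioning in each signal's implied safeguards from a per-signal lookup table seeded with the always-required base set.
import Mathlib
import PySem

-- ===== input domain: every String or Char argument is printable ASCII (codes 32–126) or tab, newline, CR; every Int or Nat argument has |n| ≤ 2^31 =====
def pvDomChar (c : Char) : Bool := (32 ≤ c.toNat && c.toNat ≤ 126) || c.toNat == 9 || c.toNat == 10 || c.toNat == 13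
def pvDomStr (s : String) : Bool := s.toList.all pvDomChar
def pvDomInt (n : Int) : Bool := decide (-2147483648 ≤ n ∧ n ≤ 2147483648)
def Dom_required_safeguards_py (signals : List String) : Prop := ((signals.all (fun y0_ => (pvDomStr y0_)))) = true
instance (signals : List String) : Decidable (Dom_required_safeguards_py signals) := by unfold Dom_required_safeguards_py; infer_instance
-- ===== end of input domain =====

-- One honest line: B replaces A's two fixed trigger-set intersections by a single pass over the
-- signals, unioning in each signal's implied safeguards from a per-signal lookup table (idiomatic).

-- ===== PORT A =====
def pvOrder : List String :=
  ["golden_queries", "offline_evaluation", "relevance_metrics", "rollback_plan",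
   "index_rebuild_validation", "analytics_instrumentation", "manual_review"]

def required_safeguards_py (signals : List String) : List String :=
  let required : PySem.Set String :=
    PySem.Set.ofList ["golden_queries", "offline_evaluation", "relevance_metrics",
                      "rollback_plan", "analytics_instrumentation"]
  let required :=
    if PySem.Set.inter (PySem.Set.ofList ["stemming", "synonyms", "typo_tolerance", "embeddings", "indexing_weights"])
        (PySem.Set.ofList signals) ≠ [] then
      PySem.Set.add required "index_rebuild_validation"
    else required
  let required :=
    if PySem.Set.inter (PySem.Set.ofList ["ranking", "relevance", "embeddings", "personalization", "indexing_weights"])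
        (PySem.Set.ofList signals) ≠ [] then
      PySem.Set.add required "manual_review"
    else required
  pvOrder.filter (fun s => PySem.Set.contains required s)

-- ===== PORT B =====
def pvBase : List String :=
  ["golden_queries", "offline_evaluation", "relevance_metrics", "rollback_plan",
   "analytics_instrumentation"]

def pvImplies : PySem.Dict String (List String) :=
  PySem.Dict.ofList
    [("embeddings", ["index_rebuild_validation", "manual_review"]),
     ("indexing_weights", ["index_rebuild_validation", "manual_review"]),
     ("stemming", ["index_rebuild_validation"]),
     ("synonyms", ["index_rebuild_validation"]),
     ("typo_tolerance", ["index_rebuild_validation"]),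
     ("ranking", ["manual_review"]),
     ("relevance", ["manual_review"]),
     ("personalization", ["manual_review"])]

def required_safeguards_py_alt (signals : List String) : List String :=
  let required : PySem.Set String :=
    signals.foldl (fun acc s => PySem.Set.union acc (pvImplies.getD s []))
      (PySem.Set.ofList pvBase)
  pvOrder.filter (fun s => PySem.Set.contains required s)

-- ===== PRECONDITION & SPEC =====
def Spec_required_safeguards_py (signals : List String) (out : List String) : Prop := out = required_safeguards_py_alt signals
instance (signals : List String) (out : List String) : Decidable (Spec_required_safeguards_py signals out) := by unfold Spec_required_safeguards_py; infer_instance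

-- ===== CLAIM (what is proved, stated in full; the proofs are below) =====
def Claim_equal_required_safeguards_py : Prop := ∀ (signals : List String), Dom_required_safeguards_py signals → Spec_required_safeguards_py signals (required_safeguards_py signals)

-- ===== LEMMAS AND PROOFS =====

-- membership in B's union-fold
theorem mem_foldl_union {x : String} (signals : List String) (init : PySem.Set String) :
    x ∈ signals.foldl (fun acc s => PySem.Set.union acc (pvImplies.getD s [])) init ↔
      x ∈ init ∨ ∃ s ∈ signals, x ∈ pvImplies.getD s [] := by
  induction signals generalizing init with
  | nil => simp
  | cons a l ih =>
    simp only [List.foldl_cons, ih, PySem.Set.mem_union, List.mem_cons]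
    constructor
    · rintro (⟨h | h⟩ | ⟨s, hs, hx⟩)
      · exact Or.inl h
      · exact Or.inr ⟨a, Or.inl rfl, h⟩
      · exact Or.inr ⟨s, Or.inr hs, hx⟩
    · rintro (h | ⟨s, rfl | hs, hx⟩)
      · exact Or.inl (Or.inl h)
      · exact Or.inl (Or.inr hx)
      · exact Or.inr ⟨s, hs, hx⟩

-- the per-signal table, characterised
theorem mem_table (s x : String) :
    x ∈ pvImplies.getD s [] ↔
      (x = "index_rebuild_validation" ∧
        s ∈ ["stemming", "synonyms", "typo_tolerance", "embeddings", "indexing_weights"]) ∨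
      (x = "manual_review" ∧
        s ∈ ["ranking", "relevance", "embeddings", "personalization", "indexing_weights"]) := by
  have hmk : pvImplies = PySem.Dict.mk
    [("embeddings", ["index_rebuild_validation", "manual_review"]),
     ("indexing_weights", ["index_rebuild_validation", "manual_review"]),
     ("stemming", ["index_rebuild_validation"]),
     ("synonyms", ["index_rebuild_validation"]),
     ("typo_tolerance", ["index_rebuild_validation"]),
     ("ranking", ["manual_review"]),
     ("relevance", ["manual_review"]),
     ("personalization", ["manual_review"])] := by decide
  rw [hmk]; clear hmk
  simp only [PySem.Dict.getD, PySem.Dict.get?_mk_cons]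
  split_ifs with g1 g2 g3 g4 g5 g6 g7 g8 <;> simp_all [PySem.Dict.get?] <;> aesop

theorem memA (signals : List String) (x : String) :
    (x ∈ (let required : PySem.Set String :=
        PySem.Set.ofList ["golden_queries", "offline_evaluation", "relevance_metrics",
                          "rollback_plan", "analytics_instrumentation"]
      let required :=
        if PySem.Set.inter (PySem.Set.ofList ["stemming", "synonyms", "typo_tolerance", "embeddings", "indexing_weights"])
            (PySem.Set.ofList signals) ≠ [] then
          PySem.Set.add required "index_rebuild_validation"
        else required
      if PySem.Set.inter (PySem.Set.ofList ["ranking", "relevance", "embeddings", "personalization", "indexing_weights"])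
          (PySem.Set.ofList signals) ≠ [] then
        PySem.Set.add required "manual_review"
      else required)) ↔
      x ∈ pvBase ∨
        (x = "index_rebuild_validation" ∧
          ∃ s ∈ signals, s ∈ ["stemming", "synonyms", "typo_tolerance", "embeddings", "indexing_weights"]) ∨
        (x = "manual_review" ∧
          ∃ s ∈ signals, s ∈ ["ranking", "relevance", "embeddings", "personalization", "indexing_weights"]) := by
  have hne : ∀ (T : List String),
      PySem.Set.inter (PySem.Set.ofList T) (PySem.Set.ofList signals) ≠ [] ↔
        ∃ s ∈ signals, s ∈ T := by
    intro T
    rw [Ne, List.eq_nil_iff_forall_not_mem]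
    push Not
    constructor
    · rintro ⟨y, hy⟩
      rw [PySem.Set.mem_inter, PySem.Set.mem_ofList, PySem.Set.mem_ofList] at hy
      exact ⟨y, hy.2, hy.1⟩
    · rintro ⟨s, hs, hT⟩
      exact ⟨s, by rw [PySem.Set.mem_inter, PySem.Set.mem_ofList, PySem.Set.mem_ofList]; exact ⟨hT, hs⟩⟩
  simp only [hne]
  by_cases c1 : ∃ s ∈ signals,
      s = "stemming" ∨ s = "synonyms" ∨ s = "typo_tolerance" ∨ s = "embeddings" ∨ s = "indexing_weights" <;>
    by_cases c2 : ∃ s ∈ signals,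
      s = "ranking" ∨ s = "relevance" ∨ s = "embeddings" ∨ s = "personalization" ∨ s = "indexing_weights" <;>
    simp [c1, c2, List.mem_append, PySem.Set.mem_ofList, pvBase]

-- ===== VERDICT (by name: the statement is the Claim_ definition above) =====
theorem required_safeguards_py_spec : Claim_equal_required_safeguards_py := by
  intro signals _
  show required_safeguards_py signals = required_safeguards_py_alt signals
  unfold required_safeguards_py required_safeguards_py_alt
  apply List.filter_congr
  intro x hx
  rw [Bool.eq_iff_iff, PySem.Set.contains_iff, PySem.Set.contains_iff]
  rw [memA signals x, mem_foldl_union signals]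
  constructor
  · rintro (h | ⟨rfl, s, hs, hT⟩ | ⟨rfl, s, hs, hT⟩)
    · exact Or.inl (by rw [PySem.Set.mem_ofList]; exact h)
    · exact Or.inr ⟨s, hs, (mem_table s _).mpr (Or.inl ⟨rfl, hT⟩)⟩
    · exact Or.inr ⟨s, hs, (mem_table s _).mpr (Or.inr ⟨rfl, hT⟩)⟩
  · rintro (h | ⟨s, hs, hx'⟩)
    · exact Or.inl (by rwa [PySem.Set.mem_ofList] at h)
    · rcases (mem_table s x).mp hx' with ⟨rfl, hT⟩ | ⟨rfl, hT⟩
      · exact Or.inr (Or.inl ⟨rfl, s, hs, hT⟩)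
      · exact Or.inr (Or.inr ⟨rfl, s, hs, hT⟩)
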